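-- pv_equiv track=rewrite | github.com/gkate78/bps | app/routes/bill_routes.py | _visible_receipt_fields
-- ===== SOURCE A (Python) =====
-- from typing import Optional
--
-- RECEIPT_FIELD_KEYS = (
--     "reference",
--     "txn_datetime",
--     "account",
--     "biller",
--     "customer_name",
--     "bill_amt",
--     "late_charge",
--     "charge",
--     "total",
--     "cash",
--     "change_amt",
-- )
--
-- def _visible_receipt_fields(raw: Optional[str]) -> set[str]:
--     if not raw:
--         return set(RECEIPT_FIELD_KEYS)
--     selected = {part.strip() for part in raw.split(",") if part.strip()}
--     if "amt2" in selected: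
--         selected.remove("amt2")
--         selected.add("late_charge")
--     return {key for key in RECEIPT_FIELD_KEYS if key in selected}
-- ===== SOURCE B (Python) =====
-- from typing import Optional
--
-- RECEIPT_FIELD_KEYS = (
--     "reference",
--     "txn_datetime",
--     "account",
--     "biller",
--     "customer_name",
--     "bill_amt",
--     "late_charge",
--     "charge",
--     "total",
--     "cash",
--     "change_amt",
-- )
--
-- def _visible_receipt_fields(raw):
--     # Single character-level scan: no split()/strip(); tokens are assembled and
--     # trimmed on the fly by a small state machine (token + pending whitespace).
--     if not raw:
--         return set(RECEIPT_FIELD_KEYS)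
--     found = set()
--     token = ""   # current token with leading/trailing whitespace already trimmed
--     pend = ""    # whitespace seen after token started; kept only if more text follows
--     for ch in raw:
--         if ch == ",":
--             found.add("late_charge" if token == "amt2" else token)
--             token = ""
--             pend = ""
--         elif ch.isspace():
--             if token:
--                 pend += ch
--         else:
--             token += pend + ch
--             pend = ""
--     found.add("late_charge" if token == "amt2" else token)
--     return {key for key in RECEIPT_FIELD_KEYS if key in found}
-- ===== Notes on version B (the rewrite author's own statement) =====
-- stated objective: alternative
-- what changed: B replaces A's split/strip/set pipeline (split on commas, strip each part, build a token set, post-hoc alias removal/re-insertion, then scan the key tuple) by a single character-level state machine: one pass over the raw string assembles each token already trimmed (token buffer + pending-whitespace buffer), rewrites the legacy alias to its canonical key as the token is finalised, and records it; the visible keys are then read off in canonical order.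
import Mathlib
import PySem

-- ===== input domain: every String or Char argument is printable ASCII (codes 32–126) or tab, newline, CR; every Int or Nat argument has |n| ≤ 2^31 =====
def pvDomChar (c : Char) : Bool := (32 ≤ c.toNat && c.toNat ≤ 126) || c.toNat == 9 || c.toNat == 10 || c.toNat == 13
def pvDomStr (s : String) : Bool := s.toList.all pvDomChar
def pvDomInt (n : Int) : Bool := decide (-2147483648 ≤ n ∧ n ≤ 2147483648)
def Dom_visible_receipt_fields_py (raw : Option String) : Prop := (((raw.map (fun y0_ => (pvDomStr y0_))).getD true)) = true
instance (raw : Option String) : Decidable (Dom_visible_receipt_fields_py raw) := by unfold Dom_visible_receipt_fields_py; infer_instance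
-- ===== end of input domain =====

-- B replaces A's split/strip/set pipeline by a single character-level state machine that
-- assembles each token already trimmed and records it as it is finalised (alternative
-- decomposition, same cost).

def pvKeys : List String :=
  ["reference", "txn_datetime", "account", "biller", "customer_name",
   "bill_amt", "late_charge", "charge", "total", "cash", "change_amt"]

-- ===== PORT A =====
-- raw.split(",") — the separator "," is nonempty, so split? is always some
def pvParts (s : String) : List String := (PySem.Str.split? s ",").getD []

-- the set-comprehension accumulator: {part.strip() for part in … if part.strip()}
def pvAStep (acc : PySem.Set String) (part : String) : PySem.Set String :=
  if PySem.Str.strip part ≠ "" then PySem.Set.add acc (PySem.Str.strip part) else acc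

def visible_receipt_fields_py (raw : Option String) : List String :=
  match raw with
  | none => PySem.Set.ofList pvKeys
  | some s =>
    if s = "" then PySem.Set.ofList pvKeys
    else
      let selected : PySem.Set String := (pvParts s).foldl pvAStep PySem.Set.empty
      -- selected.remove("amt2") is guarded by the membership test, so it cannot raise: Set.discard
      let selected :=
        if PySem.Set.contains selected "amt2" then
          PySem.Set.add (PySem.Set.discard selected "amt2") "late_charge"
        else selected
      pvKeys.foldl (fun acc key =>
        if PySem.Set.contains selected key then PySem.Set.add acc key else acc) PySem.Set.empty

-- ===== PORT B =====
-- "late_charge" if token == "amt2" else token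
def pvRw (t : String) : String := if t = "amt2" then "late_charge" else t

-- one step of the character scan; state = (found, token, pend).
-- Python's str buffers are ported as List Char (exact: concatenation/equality on code points).
def pvScanStep (st : PySem.Set String × List Char × List Char) (ch : Char) :
    PySem.Set String × List Char × List Char :=
  if ch = ',' then (PySem.Set.add st.1 (pvRw (String.ofList st.2.1)), [], [])
  else if PySem.Chars.isspace ch then
    (if st.2.1 ≠ [] then (st.1, st.2.1, st.2.2 ++ [ch]) else st)
  else (st.1, st.2.1 ++ st.2.2 ++ [ch], [])

def visible_receipt_fields_py_alt (raw : Option String) : List String :=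
  match raw with
  | none => PySem.Set.ofList pvKeys
  | some s =>
    if s = "" then PySem.Set.ofList pvKeys
    else
      let st := s.toList.foldl pvScanStep (PySem.Set.empty, [], [])
      let found := PySem.Set.add st.1 (pvRw (String.ofList st.2.1))
      pvKeys.foldl (fun acc key =>
        if PySem.Set.contains found key then PySem.Set.add acc key else acc) PySem.Set.empty

-- ===== PRECONDITION & SPEC =====
def Spec_visible_receipt_fields_py (raw : Option String) (out : List String) : Prop := out = visible_receipt_fields_py_alt raw
instance (raw : Option String) (out : List String) : Decidable (Spec_visible_receipt_fields_py raw out) := by unfold Spec_visible_receipt_fields_py; infer_instance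

-- ===== CLAIM (what is proved, stated in full; the proofs are below) =====
def Claim_equal_visible_receipt_fields_py : Prop := ∀ (raw : Option String), Dom_visible_receipt_fields_py raw → Spec_visible_receipt_fields_py raw (visible_receipt_fields_py raw)

-- ===== LEMMAS AND PROOFS =====

-- membership in A's accumulated token set
theorem pv_mem_astep_foldl (parts : List String) :
    ∀ (s : PySem.Set String) (x : String),
      x ∈ parts.foldl pvAStep s ↔ x ∈ s ∨ (x ≠ "" ∧ ∃ p ∈ parts, PySem.Str.strip p = x) := by
  induction parts with
  | nil => intro s x; simp
  | cons p ps ih =>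
    intro s x
    simp only [List.foldl_cons, ih]
    by_cases h : PySem.Str.strip p = ""
    · rw [show pvAStep s p = s from by simp [pvAStep, h]]
      constructor
      · rintro (hx | ⟨hne, q, hq, hsq⟩)
        · exact Or.inl hx
        · exact Or.inr ⟨hne, q, List.mem_cons_of_mem _ hq, hsq⟩
      · rintro (hx | ⟨hne, q, hq, hsq⟩)
        · exact Or.inl hx
        · rcases List.mem_cons.mp hq with rfl | hq'
          · exact absurd (hsq.symm.trans h) hne
          · exact Or.inr ⟨hne, q, hq', hsq⟩
    · rw [show pvAStep s p = PySem.Set.add s (PySem.Str.strip p) from by simp [pvAStep, h]]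
      constructor
      · rintro (hx | ⟨hne, q, hq, hsq⟩)
        · rcases (PySem.Set.mem_add _ _ _).mp hx with hx' | rfl
          · exact Or.inl hx'
          · exact Or.inr ⟨h, p, List.mem_cons_self, rfl⟩
        · exact Or.inr ⟨hne, q, List.mem_cons_of_mem _ hq, hsq⟩
      · rintro (hx | ⟨hne, q, hq, hsq⟩)
        · exact Or.inl ((PySem.Set.mem_add _ _ _).mpr (Or.inl hx))
        · rcases List.mem_cons.mp hq with rfl | hq'
          · exact Or.inl ((PySem.Set.mem_add _ _ _).mpr (Or.inr hsq.symm))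
          · exact Or.inr ⟨hne, q, hq', hsq⟩

-- PySem's fuelled comma-split is Lean's List.splitOn
theorem pv_go_eq (l : List Char) : ∀ (fuel : Nat) (cur : List Char) (acc : List (List Char)),
    l.length ≤ fuel →
    PySem.Chars.splitOn.go [','] fuel l cur acc
      = acc.reverse ++ (List.splitOn ',' l).modifyHead (cur.reverse ++ ·) := by
  induction l with
  | nil =>
    intro fuel cur acc _
    have h1 : PySem.Chars.splitOn.go [','] fuel [] cur acc = (cur.reverse :: acc).reverse := by
      cases fuel <;> simp [PySem.Chars.splitOn.go]
    simp [h1, List.splitOn, List.splitOnP_nil]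
  | cons c l ih =>
    intro fuel cur acc hf
    obtain ⟨f, rfl⟩ : ∃ f, fuel = f + 1 := ⟨fuel - 1, by simp at hf; omega⟩
    by_cases hc : c = ','
    · subst hc
      rw [show PySem.Chars.splitOn.go [','] (f+1) (','::l) cur acc
          = PySem.Chars.splitOn.go [','] f l [] (cur.reverse :: acc) from by
            simp [PySem.Chars.splitOn.go, List.isPrefixOf]]
      rw [ih f [] (cur.reverse :: acc) (by simp at hf ⊢; omega)]
      simp [List.splitOn, List.splitOnP_cons]
      obtain ⟨h, t, he⟩ : ∃ h t, List.splitOnP (fun x => x == ',') l = h :: t :=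
        List.exists_cons_of_ne_nil (List.splitOnP_ne_nil _ l)
      simp [he]
    · rw [show PySem.Chars.splitOn.go [','] (f+1) (c::l) cur acc
          = PySem.Chars.splitOn.go [','] f l (c::cur) acc from by
            simp [PySem.Chars.splitOn.go, List.isPrefixOf, Ne.symm hc]]
      rw [ih f (c::cur) acc (by simp at hf ⊢; omega)]
      obtain ⟨h, t, he⟩ : ∃ h t, List.splitOnP (fun x => x == ',') l = h :: t :=
        List.exists_cons_of_ne_nil (List.splitOnP_ne_nil _ l)
      simp [List.splitOn, List.splitOnP_cons, hc, he]

theorem pv_splitOn_comma (s : List Char) :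
    PySem.Chars.splitOn s [','] = List.splitOn ',' s := by
  rw [PySem.Chars.splitOn, pv_go_eq s (s.length + 1) [] [] (by omega)]
  obtain ⟨h, t, he⟩ : ∃ h t, List.splitOn ',' s = h :: t :=
    List.exists_cons_of_ne_nil (by simp [List.splitOn]; exact List.splitOnP_ne_nil _ s)
  simp [he]

-- strip bookkeeping for the scanner state
theorem pv_lstrip_append_of_ne (a b : List Char)
    (ha : PySem.Chars.lstrip a = a) (hne : a ≠ []) :
    PySem.Chars.lstrip (a ++ b) = a ++ b := by
  simp only [PySem.Chars.lstrip] at *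
  rw [List.dropWhile_append, ha, if_neg (by simp [hne])]

theorem pv_rstrip_append_ws (a w : List Char) (hw : ∀ c ∈ w, PySem.Chars.isspace c = true) :
    PySem.Chars.rstrip (a ++ w) = PySem.Chars.rstrip a := by
  simp only [PySem.Chars.rstrip, List.reverse_append]
  rw [List.dropWhile_append, if_pos]
  simp only [List.isEmpty_iff, List.dropWhile_eq_nil_iff]
  intro c hc; exact hw c (by simpa using hc)

theorem pv_strip_tok_pend (tok pend : List Char)
    (hl : PySem.Chars.lstrip tok = tok) (hr : PySem.Chars.rstrip tok = tok)
    (hw : ∀ c ∈ pend, PySem.Chars.isspace c = true) (he : tok = [] → pend = []) :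
    PySem.Chars.strip (tok ++ pend) = tok := by
  by_cases h : tok = []
  · subst h; rw [he rfl]; rfl
  · rw [PySem.Chars.strip, pv_lstrip_append_of_ne tok pend hl h,
      pv_rstrip_append_ws tok pend hw, hr]

theorem pv_lstrip_ext (tok pend : List Char) (c : Char)
    (hl : PySem.Chars.lstrip tok = tok) (he : tok = [] → pend = [])
    (hc : PySem.Chars.isspace c = false) :
    PySem.Chars.lstrip (tok ++ pend ++ [c]) = tok ++ pend ++ [c] := by
  by_cases h : tok = []
  · subst h; rw [he rfl]; simp [PySem.Chars.lstrip, hc]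
  · rw [List.append_assoc, pv_lstrip_append_of_ne tok (pend ++ [c]) hl h]

theorem pv_rstrip_ext (a : List Char) (c : Char) (hc : PySem.Chars.isspace c = false) :
    PySem.Chars.rstrip (a ++ [c]) = a ++ [c] := by
  simp [PySem.Chars.rstrip, hc]

theorem pv_strip_cons_ws (c : Char) (h : List Char) (hc : PySem.Chars.isspace c = true) :
    PySem.Chars.strip (c :: h) = PySem.Chars.strip h := by
  simp [PySem.Chars.strip, PySem.Chars.lstrip, hc]

-- the scanner invariant: the final found-set holds exactly the canonicalised
-- stripped parts (the pending first part being tok/pend plus the rest of l)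
theorem pv_scan (l : List Char) : ∀ (S : PySem.Set String) (tok pend : List Char),
    PySem.Chars.lstrip tok = tok → PySem.Chars.rstrip tok = tok →
    (∀ c ∈ pend, PySem.Chars.isspace c = true) → (tok = [] → pend = []) →
    ∀ x : String,
      (x ∈ PySem.Set.add (l.foldl pvScanStep (S, tok, pend)).1
            (pvRw (String.ofList (l.foldl pvScanStep (S, tok, pend)).2.1)))
        ↔ x ∈ S ∨ ∃ p ∈ (List.splitOn ',' l).modifyHead (fun q => tok ++ pend ++ q),
            pvRw (String.ofList (PySem.Chars.strip p)) = x := by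
  induction l with
  | nil =>
    intro S tok pend hl hr hw he x
    simp only [List.foldl_nil, List.splitOn, List.splitOnP_nil, List.modifyHead_cons]
    have hstp := pv_strip_tok_pend tok pend hl hr hw he
    simp [PySem.Set.mem_add, hstp, eq_comm]
  | cons c rest ih =>
    intro S tok pend hl hr hw he x
    rw [List.foldl_cons]
    obtain ⟨h, t, hrest⟩ : ∃ h t, List.splitOn ',' rest = h :: t :=
      List.exists_cons_of_ne_nil (by simp [List.splitOn]; exact List.splitOnP_ne_nil _ rest)
    by_cases hc : c = ','
    · subst hc
      rw [show pvScanStep (S, tok, pend) ',' =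
          (PySem.Set.add S (pvRw (String.ofList tok)), [], []) from by simp [pvScanStep]]
      rw [ih (PySem.Set.add S (pvRw (String.ofList tok))) [] [] rfl rfl (by simp) (fun _ => rfl) x]
      have hsplit : List.splitOn ',' (','::rest) = [] :: List.splitOn ',' rest := by
        simp [List.splitOn, List.splitOnP_cons]
      rw [hsplit, hrest]
      simp only [List.modifyHead_cons, List.nil_append, List.append_nil, List.mem_cons,
        PySem.Set.mem_add]
      have hstp := pv_strip_tok_pend tok pend hl hr hw he
      constructor
      · rintro ((hS | hEq) | ⟨p, hp, hpx⟩)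
        · exact Or.inl hS
        · exact Or.inr ⟨tok ++ pend, Or.inl rfl, by rw [hstp]; exact hEq.symm⟩
        · exact Or.inr ⟨p, Or.inr hp, hpx⟩
      · rintro (hS | ⟨p, rfl | hp, hpx⟩)
        · exact Or.inl (Or.inl hS)
        · rw [hstp] at hpx
          exact Or.inl (Or.inr hpx.symm)
        · exact Or.inr ⟨p, hp, hpx⟩
    · have hsplit : List.splitOn ',' (c::rest) = (c :: h) :: t := by
        simp [List.splitOn, List.splitOnP_cons, hc]
        simp [List.splitOn] at hrest
        simp [hrest]
      by_cases hs : PySem.Chars.isspace c = true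
      · by_cases ht : tok = []
        · have hp0 : pend = [] := he ht
          rw [show pvScanStep (S, tok, pend) c = (S, tok, pend) from by
            simp [pvScanStep, hc, hs, ht]]
          rw [ih S tok pend hl hr hw he x, hsplit, hrest]
          subst ht; rw [hp0]
          simp only [List.modifyHead_cons, List.nil_append, List.mem_cons]
          have hsc := pv_strip_cons_ws c h hs
          constructor
          · rintro (hS | ⟨p, hp | hp, hpx⟩)
            · exact Or.inl hS
            · exact Or.inr ⟨c :: h, Or.inl rfl, by rw [hsc, ← hp]; exact hpx⟩
            · exact Or.inr ⟨p, Or.inr hp, hpx⟩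
          · rintro (hS | ⟨p, hp | hp, hpx⟩)
            · exact Or.inl hS
            · exact Or.inr ⟨h, Or.inl rfl, by rw [hp, hsc] at hpx; exact hpx⟩
            · exact Or.inr ⟨p, Or.inr hp, hpx⟩
        · have hwe : ∀ d ∈ pend ++ [c], PySem.Chars.isspace d = true := by
            intro d hd
            rcases List.mem_append.mp hd with hd | hd
            · exact hw d hd
            · simp at hd; subst hd; exact hs
          rw [show pvScanStep (S, tok, pend) c = (S, tok, pend ++ [c]) from by
            simp [pvScanStep, hc, hs, ht]]
          rw [ih S tok (pend ++ [c]) hl hr hwe (fun h' => absurd h' ht) x, hsplit, hrest]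
          simp only [List.modifyHead_cons, List.mem_cons]
          have : tok ++ (pend ++ [c]) ++ h = tok ++ pend ++ (c :: h) := by
            simp
          rw [this]
      · have hs' : PySem.Chars.isspace c = false := by simpa using hs
        rw [show pvScanStep (S, tok, pend) c = (S, tok ++ pend ++ [c], []) from by
          simp [pvScanStep, hc, hs]]
        have hl' := pv_lstrip_ext tok pend c hl he hs'
        have hr' : PySem.Chars.rstrip (tok ++ pend ++ [c]) = tok ++ pend ++ [c] :=
          pv_rstrip_ext (tok ++ pend) c hs'
        rw [ih S (tok ++ pend ++ [c]) [] hl' hr' (by simp)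
          (fun h' => rfl) x, hsplit, hrest]
        simp only [List.modifyHead_cons, List.mem_cons]
        have : tok ++ pend ++ [c] ++ [] ++ h = tok ++ pend ++ (c :: h) := by
          simp
        rw [this]

-- A's parts as Strings are the comma-split of the char list
theorem pv_parts_eq (s : String) :
    pvParts s = (List.splitOn ',' s.toList).map String.ofList := by
  simp [pvParts, PySem.Str.split?, PySem.Chars.split?, pv_splitOn_comma]

-- membership in B's final found-set, phrased over A's string parts
theorem pv_found_mem (s : String) (x : String) :
    (x ∈ PySem.Set.add (s.toList.foldl pvScanStep (PySem.Set.empty, [], [])).1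
          (pvRw (String.ofList (s.toList.foldl pvScanStep (PySem.Set.empty, [], [])).2.1)))
      ↔ ∃ p ∈ pvParts s, pvRw (PySem.Str.strip p) = x := by
  rw [pv_scan s.toList PySem.Set.empty [] [] rfl rfl (by simp) (fun _ => rfl) x]
  obtain ⟨h, t, hrest⟩ : ∃ h t, List.splitOn ',' s.toList = h :: t :=
    List.exists_cons_of_ne_nil (by simp [List.splitOn]; exact List.splitOnP_ne_nil _ s.toList)
  rw [pv_parts_eq s, hrest]
  simp only [List.modifyHead_cons, List.nil_append, List.map_cons, List.mem_cons]
  constructor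
  · rintro (hS | ⟨p, hp, hpx⟩)
    · exact absurd hS (by simp [PySem.Set.empty])
    · refine ⟨String.ofList p, ?_, ?_⟩
      · rcases hp with rfl | hp
        · exact Or.inl rfl
        · exact Or.inr (List.mem_map_of_mem hp)
      · rw [PySem.Str.strip, String.toList_ofList]; exact hpx
  · rintro ⟨p, hp, hpx⟩
    right
    rcases hp with rfl | hp
    · exact ⟨h, Or.inl rfl, by rw [PySem.Str.strip, String.toList_ofList] at hpx; exact hpx⟩
    · obtain ⟨q, hq, rfl⟩ := List.mem_map.mp hp
      exact ⟨q, Or.inr hq, by rw [PySem.Str.strip, String.toList_ofList] at hpx; exact hpx⟩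

-- a guarded-add fold over distinct fresh keys is a filter
theorem pv_foldl_add_filter (ks : List String) :
    ∀ (pr : String → Bool) (acc : PySem.Set String), ks.Nodup → (∀ k ∈ ks, k ∉ acc) →
      ks.foldl (fun a k => if pr k then PySem.Set.add a k else a) acc = acc ++ ks.filter pr := by
  induction ks with
  | nil => intro pr acc _ _; simp
  | cons k ks ih =>
    intro pr acc hnd hfr
    have hk : k ∉ acc := hfr k (by simp)
    have hnd' : ks.Nodup := (List.nodup_cons.mp hnd).2
    have hkks : k ∉ ks := (List.nodup_cons.mp hnd).1
    simp only [List.foldl_cons, List.filter_cons]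
    by_cases hp : pr k = true
    · rw [if_pos hp, if_pos hp, PySem.Set.add_of_not_mem hk,
        ih pr (acc ++ [k]) hnd' (by
          intro x hx
          simp only [List.mem_append, List.mem_singleton]
          rintro (h | rfl)
          · exact hfr x (List.mem_cons_of_mem _ hx) h
          · exact hkks hx)]
      simp
    · rw [if_neg (by simp [hp]), if_neg (by simp [hp]),
        ih pr acc hnd' (fun x hx => hfr x (List.mem_cons_of_mem _ hx))]

theorem pv_nodup_keys : pvKeys.Nodup := by decide

-- the per-key agreement of A's membership test with B's found-set
theorem pv_key_agree (parts : List String) (sel sel' found : PySem.Set String)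
    (hmem_sel : ∀ x, x ∈ sel ↔ x ≠ "" ∧ ∃ p ∈ parts, PySem.Str.strip p = x)
    (hsel' : sel' = if PySem.Set.contains sel "amt2" then
        PySem.Set.add (PySem.Set.discard sel "amt2") "late_charge" else sel)
    (hfound : ∀ x, x ∈ found ↔ ∃ p ∈ parts, pvRw (PySem.Str.strip p) = x)
    (k : String) (hk : k ∈ pvKeys) :
    PySem.Set.contains sel' k = PySem.Set.contains found k := by
  have hkprops : k ≠ "" ∧ k ≠ "amt2" := by
    have : ∀ x ∈ pvKeys, x ≠ "" ∧ x ≠ "amt2" := by decide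
    exact this k hk
  rw [Bool.eq_iff_iff, PySem.Set.contains_iff, PySem.Set.contains_iff, hfound]
  by_cases hlc : k = "late_charge"
  · subst hlc
    constructor
    · intro hmem
      rw [hsel'] at hmem
      by_cases ha : PySem.Set.contains sel "amt2" = true
      · rw [PySem.Set.contains_iff, hmem_sel] at ha
        rcases ha with ⟨-, p, hp, hsp⟩
        exact ⟨p, hp, by simp [pvRw, hsp]⟩
      · rw [if_neg ha, hmem_sel] at hmem
        rcases hmem with ⟨-, p, hp, hsp⟩
        exact ⟨p, hp, by simp [pvRw, hsp]⟩
    · rintro ⟨p, hp, hrw⟩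
      rw [hsel']
      by_cases ha : PySem.Set.contains sel "amt2" = true
      · rw [if_pos ha, PySem.Set.mem_add]; exact Or.inr rfl
      · rw [if_neg ha, hmem_sel]
        refine ⟨hkprops.1, p, hp, ?_⟩
        unfold pvRw at hrw
        by_cases hs : PySem.Str.strip p = "amt2"
        · exfalso
          apply ha
          rw [PySem.Set.contains_iff, hmem_sel]
          exact ⟨by decide, p, hp, hs⟩
        · rw [if_neg hs] at hrw; exact hrw
  · have hrweq : ∀ t, pvRw t = k ↔ t = k := by
      intro t
      unfold pvRw
      by_cases hs : t = "amt2"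
      · subst hs
        rw [if_pos rfl]
        constructor
        · intro h; exact absurd h.symm hlc
        · intro h; exact absurd h.symm hkprops.2
      · simp [hs]
    constructor
    · intro hmem
      rw [hsel'] at hmem
      have hksel : k ∈ sel := by
        by_cases ha : PySem.Set.contains sel "amt2" = true
        · rw [if_pos ha, PySem.Set.mem_add, PySem.Set.mem_discard] at hmem
          rcases hmem with ⟨h, -⟩ | h
          · exact h
          · exact absurd h hlc
        · rwa [if_neg ha] at hmem
      rw [hmem_sel] at hksel
      rcases hksel with ⟨-, p, hp, hsp⟩
      exact ⟨p, hp, (hrweq _).mpr hsp⟩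
    · rintro ⟨p, hp, hrw⟩
      have hsp := (hrweq _).mp hrw
      rw [hsel']
      by_cases ha : PySem.Set.contains sel "amt2" = true
      · rw [if_pos ha, PySem.Set.mem_add, PySem.Set.mem_discard]
        exact Or.inl ⟨(hmem_sel k).mpr ⟨hkprops.1, p, hp, hsp⟩, hkprops.2⟩
      · rw [if_neg ha]
        exact (hmem_sel k).mpr ⟨hkprops.1, p, hp, hsp⟩

-- ===== VERDICT (by name: the statement is the Claim_ definition above) =====
theorem visible_receipt_fields_py_spec : Claim_equal_visible_receipt_fields_py := by
  intro raw _
  unfold Spec_visible_receipt_fields_py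
  cases raw with
  | none => rfl
  | some s =>
    by_cases hs : s = ""
    · subst hs; rfl
    · simp only [visible_receipt_fields_py, visible_receipt_fields_py_alt, if_neg hs]
      set sel : PySem.Set String := (pvParts s).foldl pvAStep PySem.Set.empty with hsel
      set sel' : PySem.Set String := (if PySem.Set.contains sel "amt2" then
          PySem.Set.add (PySem.Set.discard sel "amt2") "late_charge" else sel) with hsel'
      set st := s.toList.foldl pvScanStep (PySem.Set.empty, [], []) with hst
      set found := PySem.Set.add st.1 (pvRw (String.ofList st.2.1)) with hfound
      rw [pv_foldl_add_filter pvKeys (fun key => PySem.Set.contains sel' key) PySem.Set.empty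
            pv_nodup_keys (by intro k _ h; simp at h)]
      rw [pv_foldl_add_filter pvKeys (fun key => PySem.Set.contains found key) PySem.Set.empty
            pv_nodup_keys (by intro k _ h; simp at h)]
      congr 1
      apply List.filter_congr
      intro k hk
      exact pv_key_agree (pvParts s) sel sel' found
        (by intro x; rw [hsel, pv_mem_astep_foldl]; simp)
        hsel'
        (by intro x; rw [hfound, hst]; exact pv_found_mem s x)
        k hk
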